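-- pv_equiv track=rewrite | github.com/vinchinzu/euler | python/752_fast.py | factorize_with_sieve
-- ===== SOURCE A (Python) =====
-- def factorize_with_sieve(n, spf):
--     """Factorize n using the sieve."""
--     factors = []
--     while n > 1:
--         p = spf[n]
--         exp = 0
--         while n % p == 0:
--             exp += 1
--             n //= p
--         factors.append((p, exp))
--     return factors
-- ===== SOURCE B (Python) =====
-- def factorize_with_sieve(n, spf):
--     """Factorize n using the sieve: flat division pass, then run-length grouping."""
--     flat = []
--     while n > 1:
--         p = spf[n]
--         flat.append(p)
--         n //= p
--     out = []
--     for p in flat: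
--         if out and out[-1][0] == p:
--             out[-1] = (p, out[-1][1] + 1)
--         else:
--             out.append((p, 1))
--     return out
-- ===== Notes on version B (the rewrite author's own statement) =====
-- stated objective: alternative
-- what changed: Replaced A's nested exponent-counting while-loop (one dict lookup per prime, inner loop dividing out that prime) by a flat single-division pass (one lookup per division) producing the ascending prime list, followed by a separate run-length grouping pass into (prime, exponent) pairs.
-- outside the precondition, e.g. on factorize_with_sieve(12, {12: 2, 6: 3, 3: 3}): A returns [(2, 2), (3, 1)], B raises KeyError
import Mathlib
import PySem

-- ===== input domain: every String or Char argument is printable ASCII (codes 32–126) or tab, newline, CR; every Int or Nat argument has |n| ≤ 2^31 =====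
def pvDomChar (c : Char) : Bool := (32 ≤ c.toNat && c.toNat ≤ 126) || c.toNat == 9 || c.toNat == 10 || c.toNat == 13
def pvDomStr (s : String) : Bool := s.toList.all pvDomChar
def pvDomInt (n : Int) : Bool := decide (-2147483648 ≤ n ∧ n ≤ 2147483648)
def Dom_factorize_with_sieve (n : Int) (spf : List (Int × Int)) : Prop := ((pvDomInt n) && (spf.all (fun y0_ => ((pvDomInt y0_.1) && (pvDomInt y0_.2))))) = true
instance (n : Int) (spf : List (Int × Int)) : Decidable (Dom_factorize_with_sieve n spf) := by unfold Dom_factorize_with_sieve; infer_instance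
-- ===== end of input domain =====

-- B replaces A's nested exponent-counting loop by a flat division pass plus a separate
-- run-length grouping pass (alternative decomposition, same cost; return value only).


-- ===== PORT A =====
-- inner 'while n % p == 0: exp += 1; n //= p' loop; fuel makes it total (enough fuel under Pre_)
def pvAInner : Nat → Int → Int → Int × Int
  | 0, n, _ => (n, 0)
  | f + 1, n, p =>
    if PySem.Int.mod n p = 0 then
      let r := pvAInner f (PySem.Int.floordiv n p) p
      (r.1, r.2 + 1)
    else (n, 0)

-- outer 'while n > 1' loop; a missing key (Python KeyError) yields [] and is excluded by Pre_
def pvAOuter : Nat → Int → PySem.Dict Int Int → List (Int × Int)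
  | 0, _, _ => []
  | f + 1, n, spf =>
    if n > 1 then
      match PySem.Dict.get? spf n with
      | none => []
      | some p =>
        let r := pvAInner f n p
        (p, r.2) :: pvAOuter f r.1 spf
    else []

def factorize_with_sieve (n : Int) (spf : List (Int × Int)) : List (Int × Int) :=
  pvAOuter (n.toNat + 1) n (PySem.Dict.mk spf)

-- ===== PORT B =====
-- flat pass: 'while n > 1: flat.append(spf[n]); n //= spf[n]'
def pvBFlat : Nat → Int → PySem.Dict Int Int → List Int
  | 0, _, _ => []
  | f + 1, n, spf =>
    if n > 1 then
      match PySem.Dict.get? spf n with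
      | none => []
      | some p => p :: pvBFlat f (PySem.Int.floordiv n p) spf
    else []

-- grouping pass body: 'if out and out[-1][0] == p: out[-1] = (p, out[-1][1]+1) else: out.append((p,1))'
def pvBStep (out : List (Int × Int)) (p : Int) : List (Int × Int) :=
  match out.getLast? with
  | some (q, e) => if q = p then out.dropLast ++ [(p, e + 1)] else out ++ [(p, 1)]
  | none => out ++ [(p, 1)]

def factorize_with_sieve_alt (n : Int) (spf : List (Int × Int)) : List (Int × Int) :=
  (pvBFlat (n.toNat + 1) n (PySem.Dict.mk spf)).foldl pvBStep []

-- ===== PRECONDITION & SPEC =====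
-- Pre_ requires spf to map every k in 2..n to its smallest prime factor (a correct SPF sieve, the
-- function's documented input). On other tables A may diverge or raise KeyError, and since B consults
-- the table at every intermediate quotient while A reuses one lookup per prime, the two consult
-- different keys and return or raise differently there.
-- smallest divisor ≥ 2 of k (= Nat.minFac for k ≥ 2), written so that kernel 'decide' can evaluate it
def pvMinFac (k : Nat) : Nat :=
  ((List.range' 2 (k - 1)).find? (fun d => k % d = 0)).getD k

-- the size guard only makes the check fail fast when spf cannot possibly cover 2..n
def Pre_factorize_with_sieve (n : Int) (spf : List (Int × Int)) : Prop :=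
  (if (n - 1).toNat ≤ spf.length then
    (List.range' 2 (n - 1).toNat).all
      (fun k => (PySem.Dict.mk spf).get? (k : Int) == some ((pvMinFac k : Nat) : Int))
  else false) = true
instance (n : Int) (spf : List (Int × Int)) : Decidable (Pre_factorize_with_sieve n spf) := by
  unfold Pre_factorize_with_sieve; infer_instance

def pvWitness_factorize_with_sieve : Int × (List (Int × Int)) :=
  (10, [(2, 2), (3, 3), (4, 2), (5, 5), (6, 2), (7, 7), (8, 2), (9, 3), (10, 2)])

def Spec_factorize_with_sieve (n : Int) (spf : List (Int × Int)) (out : List (Int × Int)) : Prop := out = factorize_with_sieve_alt n spf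
instance (n : Int) (spf : List (Int × Int)) (out : List (Int × Int)) : Decidable (Spec_factorize_with_sieve n spf out) := by unfold Spec_factorize_with_sieve; infer_instance

-- ===== CLAIM (what is proved, stated in full; the proofs are below) =====
def Claim_equal_factorize_with_sieve : Prop := ∀ (n : Int) (spf : List (Int × Int)), Dom_factorize_with_sieve n spf → Pre_factorize_with_sieve n spf → Spec_factorize_with_sieve n spf (factorize_with_sieve n spf)

-- ===== LEMMAS AND PROOFS =====

theorem pvFind?_range'_min : ∀ (len s : Nat) (pred : Nat → Bool) (p : Nat), s ≤ p → p < s + len →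
    pred p = true → (∀ d, s ≤ d → d < p → pred d = false) →
    (List.range' s len).find? pred = some p := by
  intro len
  induction len with
  | zero => intro s pred p h1 h2 _ _; omega
  | succ len ih =>
    intro s pred p h1 h2 hp hmin
    rw [List.range'_succ, List.find?_cons]
    by_cases hsp : s = p
    · subst hsp; simp [hp]
    · have hps : pred s = false := hmin s (le_refl s) (by omega)
      simp only [hps]
      exact ih (s + 1) pred p (by omega) (by omega) hp (fun d hd1 hd2 => hmin d (by omega) hd2)

theorem pvMinFac_eq {k : Nat} (h : 2 ≤ k) : pvMinFac k = k.minFac := by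
  have hk1 : k ≠ 1 := by omega
  have hp : k.minFac.Prime := Nat.minFac_prime hk1
  have h2p : 2 ≤ k.minFac := hp.two_le
  have hdvd : k.minFac ∣ k := Nat.minFac_dvd k
  have hle : k.minFac ≤ k := Nat.minFac_le (by omega)
  unfold pvMinFac
  rw [pvFind?_range'_min (k - 1) 2 _ k.minFac h2p (by omega)
    (by simp [Nat.mod_eq_zero_of_dvd hdvd])
    (fun d hd1 hd2 => by
      by_contra hcon
      simp only [Bool.not_eq_false, decide_eq_true_eq] at hcon
      have : k.minFac ≤ d := Nat.minFac_le_of_dvd hd1 (Nat.dvd_of_mod_eq_zero hcon)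
      omega)]
  rfl

-- reference flat factor list over Nat (proof-only)
def pvFlatRef (m : Nat) : List Int :=
  if h : 2 ≤ m then ((m.minFac : Nat) : Int) :: pvFlatRef (m / m.minFac) else []
decreasing_by
  exact Nat.div_lt_self (by omega) (Nat.Prime.one_lt (Nat.minFac_prime (by omega)))

-- reference run-length encoding (proof-only)
def pvRleAux (p c : Int) : List Int → List (Int × Int)
  | [] => [(p, c)]
  | q :: l => if q = p then pvRleAux p (c + 1) l else (p, c) :: pvRleAux q 1 l

def pvRle : List Int → List (Int × Int)
  | [] => []
  | p :: l => pvRleAux p 1 l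

theorem pvFlatRef_of_lt {m : Nat} (h : m < 2) : pvFlatRef m = [] := by
  rw [pvFlatRef]; simp [Nat.not_le.2 h]

theorem pvFlatRef_of_le {m : Nat} (h : 2 ≤ m) :
    pvFlatRef m = ((m.minFac : Nat) : Int) :: pvFlatRef (m / m.minFac) := by
  rw [pvFlatRef]; simp [h]

theorem pvRleAux_replicate (k : Nat) : ∀ (l : List Int) (p c : Int),
    pvRleAux p c (List.replicate k p ++ l) = pvRleAux p (c + k) l := by
  induction k with
  | zero => intro l p c; simp
  | succ k ih =>
    intro l p c
    simp only [List.replicate_succ, List.cons_append, pvRleAux, if_pos rfl]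
    rw [ih]
    congr 1
    push_cast
    ring

theorem pvRleAux_head_ne (p c : Int) (l : List Int)
    (h : ∀ q, l.head? = some q → q ≠ p) : pvRleAux p c l = (p, c) :: pvRle l := by
  cases l with
  | nil => simp [pvRleAux, pvRle]
  | cons q l' =>
    have hq : q ≠ p := h q rfl
    simp [pvRleAux, pvRle, hq]

theorem pvFoldl_bStep (l : List Int) : ∀ (acc : List (Int × Int)) (p c : Int),
    List.foldl pvBStep (acc ++ [(p, c)]) l = acc ++ pvRleAux p c l := by
  induction l with
  | nil => intro acc p c; simp [pvRleAux]
  | cons q l ih =>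
    intro acc p c
    simp only [List.foldl_cons]
    have hstep : pvBStep (acc ++ [(p, c)]) q =
        if p = q then acc ++ [(q, c + 1)] else (acc ++ [(p, c)]) ++ [(q, 1)] := by
      simp [pvBStep, List.getLast?_concat, List.dropLast_concat]
    by_cases hpq : q = p
    · subst hpq
      rw [hstep, if_pos rfl, ih]
      simp [pvRleAux]
    · rw [hstep, if_neg (fun h => hpq h.symm), ih]
      simp [pvRleAux, hpq]

theorem pvFoldl_bStep_nil (l : List Int) : List.foldl pvBStep [] l = pvRle l := by
  cases l with
  | nil => simp [pvRle]
  | cons p l =>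
    have h : pvBStep [] p = [] ++ [(p, 1)] := by simp [pvBStep]
    simp only [List.foldl_cons, h]
    rw [pvFoldl_bStep l [] p 1]
    simp [pvRle]

theorem pvInner_spec : ∀ (f m p0 : Nat), 1 ≤ m → m ≤ f → p0.Prime →
    (∀ q : Nat, q.Prime → q ∣ m → p0 ≤ q) →
    ∃ (m' e : Nat), pvAInner f (m : Int) (p0 : Int) = ((m' : Int), (e : Int)) ∧
      1 ≤ m' ∧ m' ≤ m ∧ ¬ (p0 ∣ m') ∧
      pvFlatRef m = List.replicate e ((p0 : Nat) : Int) ++ pvFlatRef m' ∧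
      (p0 ∣ m → m' < m ∧ 1 ≤ e) := by
  intro f
  induction f with
  | zero => intro m p0 h1 hf _ _; omega
  | succ f ih =>
    intro m p0 h1 hf hp hmin
    by_cases hd : p0 ∣ m
    · have hp2 : 2 ≤ p0 := hp.two_le
      have hpm : p0 ≤ m := Nat.le_of_dvd (by omega) hd
      have hm2 : 2 ≤ m := by omega
      have hdvdZ : PySem.Int.mod (m : Int) (p0 : Int) = 0 := by
        rw [PySem.Int.mod_eq_zero_iff_dvd]
        exact_mod_cast hd
      have hminfac : m.minFac = p0 := by
        apply le_antisymm
        · exact Nat.minFac_le_of_dvd hp2 hd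
        · exact hmin m.minFac (Nat.minFac_prime (by omega)) (Nat.minFac_dvd m)
      have hfd : PySem.Int.floordiv (m : Int) (p0 : Int) = ((m / p0 : Nat) : Int) :=
        PySem.Int.floordiv_natCast m p0
      have h1m1 : 1 ≤ m / p0 := Nat.div_pos hpm (by omega)
      have hm1lt : m / p0 < m := Nat.div_lt_self (by omega) (by omega)
      have hmin1 : ∀ q : Nat, q.Prime → q ∣ m / p0 → p0 ≤ q := by
        intro q hq hqd
        exact hmin q hq (hqd.trans (Nat.div_dvd_of_dvd hd))
      obtain ⟨m', e, hAI, h1', hle', hnd', hflat', _⟩ :=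
        ih (m / p0) p0 h1m1 (by omega) hp hmin1
      refine ⟨m', e + 1, ?_, h1', by omega, hnd', ?_, fun _ => ⟨by omega, by omega⟩⟩
      · simp only [pvAInner, if_pos hdvdZ, hfd, hAI]
        norm_cast
      · rw [pvFlatRef_of_le hm2, hminfac, hflat']
        simp [List.replicate_succ]
    · have hndZ : ¬ PySem.Int.mod (m : Int) (p0 : Int) = 0 := by
        rw [PySem.Int.mod_eq_zero_iff_dvd]
        intro h
        exact hd (by exact_mod_cast h)
      refine ⟨m, 0, ?_, h1, le_refl _, hd, by simp, fun h => absurd h hd⟩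
      have hdZ : ¬ ((p0 : Int) ∣ (m : Int)) := fun h => hd (by exact_mod_cast h)
      simp [pvAInner, PySem.Int.mod_eq_zero_iff_dvd, hdZ]

theorem pvOuter_spec : ∀ (f m : Nat) (n : Int) (d : PySem.Dict Int Int),
    (∀ k : Nat, 2 ≤ k → (k : Int) ≤ n → d.get? (k : Int) = some ((k.minFac : Nat) : Int)) →
    1 ≤ m → (m : Int) ≤ n → m < f →
    pvAOuter f (m : Int) d = pvRle (pvFlatRef m) := by
  intro f
  induction f with
  | zero => intro m n d _ _ _ hf; omega
  | succ f ih =>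
    intro m n d H h1 hn hf
    by_cases hm2 : 2 ≤ m
    · have hgt : (1 : Int) < (m : Int) := by omega
      have hget := H m hm2 hn
      have hp : m.minFac.Prime := Nat.minFac_prime (by omega)
      have hdvd : m.minFac ∣ m := Nat.minFac_dvd m
      have hmin : ∀ q : Nat, q.Prime → q ∣ m → m.minFac ≤ q := fun q hq hqd =>
        Nat.minFac_le_of_dvd hq.two_le hqd
      obtain ⟨m', e, hAI, h1', hle', hnd', hflat', hstrict⟩ :=
        pvInner_spec f m m.minFac h1 (by omega) hp hmin
      obtain ⟨hlt, he1⟩ := hstrict hdvd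
      have houter : pvAOuter (f + 1) (m : Int) d =
          ((m.minFac : Int), (e : Int)) :: pvAOuter f (m' : Int) d := by
        simp only [pvAOuter, if_pos hgt, hget, hAI]
      have hn' : (m' : Int) ≤ n := by omega
      rw [houter, ih m' n d H h1' hn' (by omega), hflat']
      obtain ⟨e', rfl⟩ : ∃ e', e = e' + 1 := ⟨e - 1, by omega⟩
      have hhead : ∀ q, (pvFlatRef m').head? = some q → q ≠ ((m.minFac : Nat) : Int) := by
        intro q hq hqp
        by_cases hm'2 : 2 ≤ m'
        · rw [pvFlatRef_of_le hm'2] at hq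
          simp only [List.head?_cons, Option.some.injEq] at hq
          apply hnd'
          have : m'.minFac = m.minFac := by exact_mod_cast hq ▸ hqp
          exact this ▸ Nat.minFac_dvd m'
        · rw [pvFlatRef_of_lt (by omega)] at hq
          simp at hq
      have hcast : (((e' + 1 : Nat)) : Int) = 1 + (e' : Int) := by push_cast; ring
      rw [hcast]
      symm
      calc pvRle (List.replicate (e' + 1) ((m.minFac : Nat) : Int) ++ pvFlatRef m')
          = pvRleAux ((m.minFac : Nat) : Int) 1 (List.replicate e' ((m.minFac : Nat) : Int) ++ pvFlatRef m') := by
            rw [List.replicate_succ, List.cons_append, pvRle]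
        _ = pvRleAux ((m.minFac : Nat) : Int) (1 + (e' : Int)) (pvFlatRef m') :=
            pvRleAux_replicate e' _ _ _
        _ = (((m.minFac : Nat) : Int), 1 + (e' : Int)) :: pvRle (pvFlatRef m') :=
            pvRleAux_head_ne _ _ _ hhead
    · have hm1 : m = 1 := by omega
      subst hm1
      have hng : ¬ ((1 : Nat) : Int) > 1 := by omega
      simp [pvAOuter, hng, pvFlatRef_of_lt (by omega : (1 : Nat) < 2), pvRle]

theorem pvBFlat_spec : ∀ (f m : Nat) (n : Int) (d : PySem.Dict Int Int),
    (∀ k : Nat, 2 ≤ k → (k : Int) ≤ n → d.get? (k : Int) = some ((k.minFac : Nat) : Int)) →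
    1 ≤ m → (m : Int) ≤ n → m ≤ f →
    pvBFlat f (m : Int) d = pvFlatRef m := by
  intro f
  induction f with
  | zero => intro m n d _ h1 _ hf; omega
  | succ f ih =>
    intro m n d H h1 hn hf
    by_cases hm2 : 2 ≤ m
    · have hgt : (1 : Int) < (m : Int) := by omega
      have hget := H m hm2 hn
      have hpm : m.minFac ≤ m := Nat.minFac_le (by omega)
      have hp2 : 2 ≤ m.minFac := (Nat.minFac_prime (by omega : m ≠ 1)).two_le
      have hfd : PySem.Int.floordiv (m : Int) (m.minFac : Int) = ((m / m.minFac : Nat) : Int) :=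
        PySem.Int.floordiv_natCast m m.minFac
      have h1m1 : 1 ≤ m / m.minFac := Nat.div_pos hpm (by omega)
      have hm1lt : m / m.minFac < m := Nat.div_lt_self (by omega) (by omega)
      have hstep : pvBFlat (f + 1) (m : Int) d =
          ((m.minFac : Nat) : Int) :: pvBFlat f ((m / m.minFac : Nat) : Int) d := by
        simp only [pvBFlat, if_pos hgt, hget, hfd]
      rw [hstep, ih (m / m.minFac) n d H h1m1 (by omega) (by omega), pvFlatRef_of_le hm2]
    · have hm1 : m = 1 := by omega
      subst hm1
      have hng : ¬ ((1 : Nat) : Int) > 1 := by omega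
      simp [pvBFlat, hng, pvFlatRef_of_lt (by omega : (1 : Nat) < 2)]

-- ===== VERDICT (by name: the statement is the Claim_ definition above) =====
theorem factorize_with_sieve_spec : Claim_equal_factorize_with_sieve := by
  intro n spf _hdom hpre
  unfold Spec_factorize_with_sieve factorize_with_sieve factorize_with_sieve_alt
  have H : ∀ k : Nat, 2 ≤ k → (k : Int) ≤ n →
      (PySem.Dict.mk spf).get? (k : Int) = some ((k.minFac : Nat) : Int) := by
    intro k h2 hk
    rw [← pvMinFac_eq h2]
    unfold Pre_factorize_with_sieve at hpre
    by_cases hc : (n - 1).toNat ≤ spf.length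
    · rw [if_pos hc, List.all_eq_true] at hpre
      have := hpre k (by simp only [List.mem_range'_1]; omega)
      exact eq_of_beq this
    · rw [if_neg hc] at hpre
      cases hpre
  by_cases h1 : 1 ≤ n
  · have hmn : ((n.toNat : Nat) : Int) = n := Int.toNat_of_nonneg (by omega)
    have hA := pvOuter_spec (n.toNat + 1) n.toNat n (PySem.Dict.mk spf) H (by omega)
      (by omega) (by omega)
    have hB := pvBFlat_spec (n.toNat + 1) n.toNat n (PySem.Dict.mk spf) H (by omega)
      (by omega) (by omega)
    rw [hmn] at hA hB
    rw [hA, hB, pvFoldl_bStep_nil]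
  · have hn0 : n.toNat = 0 := by omega
    have hng : ¬ n > 1 := by omega
    rw [hn0]
    simp [pvAOuter, pvBFlat, hng]
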